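-- pv_equiv track=rewrite | github.com/AamishB/Scene-Description | models/object_detector.py | get_priority_objects
-- ===== SOURCE A (Python) =====
-- def get_priority_objects(spatial_info, priority_classes=None):
--     """
--     Filter and prioritize important objects for scene description
--
--     Args:
--         spatial_info (list): Spatial information from get_spatial_info()
--         priority_classes (list): List of high-priority object classes
--
--     Returns:
--         list: Filtered and prioritized objects
--     """
--     if priority_classes is None:
--         priority_classes = ['person', 'car', 'truck', 'bus', 'bicycle', 'motorcycle',
--                           'dog', 'cat', 'traffic light', 'stop sign', 'chair', 'couch']
--
--     # Partition into priority and other objects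
--     priority, other = [], []
--     for obj in spatial_info:
--         (priority if obj['object'] in priority_classes else other).append(obj)
--
--     return priority + other
-- ===== SOURCE B (Python) =====
-- def get_priority_objects(spatial_info, priority_classes=None):
--     """
--     Filter and prioritize important objects for scene description
--     """
--     if priority_classes is None:
--         priority_classes = ['person', 'car', 'truck', 'bus', 'bicycle', 'motorcycle',
--                           'dog', 'cat', 'traffic light', 'stop sign', 'chair', 'couch']
--
--     # Stable sort on a binary key: priority objects (key 0) first, in original
--     # order, then the rest (key 1), also in original order.
--     return sorted(spatial_info, key=lambda obj: 0 if obj['object'] in priority_classes else 1)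
-- ===== Notes on version B (the rewrite author's own statement) =====
-- stated objective: idiomatic
-- what changed: Replaced the manual two-accumulator partition plus concatenation with a single stable sort on a binary key (0 for priority objects, 1 for the rest), which yields the same priority-first order by Timsort stability.
import Mathlib
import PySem

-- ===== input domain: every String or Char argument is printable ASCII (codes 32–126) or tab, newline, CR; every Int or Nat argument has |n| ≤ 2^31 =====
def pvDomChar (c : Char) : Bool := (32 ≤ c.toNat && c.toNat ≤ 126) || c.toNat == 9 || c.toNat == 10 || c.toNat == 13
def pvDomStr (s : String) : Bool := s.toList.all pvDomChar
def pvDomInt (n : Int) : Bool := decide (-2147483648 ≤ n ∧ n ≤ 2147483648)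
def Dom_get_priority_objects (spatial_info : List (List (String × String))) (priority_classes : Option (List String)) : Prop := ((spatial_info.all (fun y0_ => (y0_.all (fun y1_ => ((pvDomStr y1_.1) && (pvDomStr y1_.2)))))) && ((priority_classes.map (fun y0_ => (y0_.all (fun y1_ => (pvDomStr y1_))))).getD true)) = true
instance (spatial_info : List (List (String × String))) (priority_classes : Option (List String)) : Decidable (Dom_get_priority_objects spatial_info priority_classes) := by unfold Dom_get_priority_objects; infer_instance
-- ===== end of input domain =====

-- B replaces the manual two-list partition + concatenation with one stable
-- sort on a binary key (0 = priority, 1 = other); same result, more idiomatic.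


-- the default priority list (shared literal of both Pythons)
def pvDefaultPriority : List String :=
  ["person", "car", "truck", "bus", "bicycle", "motorcycle",
   "dog", "cat", "traffic light", "stop sign", "chair", "couch"]

-- obj['object'] in priority_classes  (KeyError, i.e. get? = none, is excluded by Pre_)
def pvIsPriority (pcs : List String) (obj : List (String × String)) : Bool :=
  match obj.lookup "object" with  -- first match = Python dict lookup
  | some s => pcs.contains s
  | none => false

-- ===== PORT A =====
def get_priority_objects (spatial_info : List (List (String × String))) (priority_classes : Option (List String)) : List (List (String × String)) :=
  -- partition into priority and other objects, then concatenate
  (spatial_info.foldl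
    (fun (acc : List (List (String × String)) × List (List (String × String))) obj =>
      if pvIsPriority (priority_classes.getD pvDefaultPriority) obj then
        (acc.1 ++ [obj], acc.2)
      else (acc.1, acc.2 ++ [obj]))
    ([], [])).1
  ++ (spatial_info.foldl
    (fun (acc : List (List (String × String)) × List (List (String × String))) obj =>
      if pvIsPriority (priority_classes.getD pvDefaultPriority) obj then
        (acc.1 ++ [obj], acc.2)
      else (acc.1, acc.2 ++ [obj]))
    ([], [])).2

-- ===== PORT B =====
def get_priority_objects_alt (spatial_info : List (List (String × String))) (priority_classes : Option (List String)) : List (List (String × String)) :=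
  -- stable sort on the binary key 0/1
  PySem.List.sorted spatial_info
    (fun obj => if pvIsPriority (priority_classes.getD pvDefaultPriority) obj then (0 : Int) else 1)
    false

-- ===== PRECONDITION & SPEC =====
-- Pre_ excludes objects without an 'object' key, on which Python A raises KeyError.
def Pre_get_priority_objects (spatial_info : List (List (String × String))) (priority_classes : Option (List String)) : Prop :=
  ∀ obj ∈ spatial_info, (obj.lookup "object").isSome = true
instance (spatial_info : List (List (String × String))) (priority_classes : Option (List String)) : Decidable (Pre_get_priority_objects spatial_info priority_classes) := by unfold Pre_get_priority_objects; infer_instance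

def pvWitness_get_priority_objects : (List (List (String × String))) × Option (List String) :=
  ([[("object", "person"), ("position", "left")], [("object", "tree")]], none)

def Spec_get_priority_objects (spatial_info : List (List (String × String))) (priority_classes : Option (List String)) (out : List (List (String × String))) : Prop := out = get_priority_objects_alt spatial_info priority_classes
instance (spatial_info : List (List (String × String))) (priority_classes : Option (List String)) (out : List (List (String × String))) : Decidable (Spec_get_priority_objects spatial_info priority_classes out) := by unfold Spec_get_priority_objects; infer_instance

-- ===== CLAIM (what is proved, stated in full; the proofs are below) =====
def Claim_equal_get_priority_objects : Prop := ∀ (spatial_info : List (List (String × String))) (priority_classes : Option (List String)), Dom_get_priority_objects spatial_info priority_classes → Pre_get_priority_objects spatial_info priority_classes → Spec_get_priority_objects spatial_info priority_classes (get_priority_objects spatial_info priority_classes)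

-- ===== LEMMAS AND PROOFS =====

-- A's fold keeps (priority-so-far, other-so-far): it computes the two filters.
theorem pv_foldl_partition {α : Type} (c : α → Bool) (xs : List α) (P Q : List α) :
    xs.foldl (fun (acc : List α × List α) x =>
        if c x then (acc.1 ++ [x], acc.2) else (acc.1, acc.2 ++ [x])) (P, Q)
      = (P ++ xs.filter c, Q ++ xs.filter (fun x => !c x)) := by
  induction xs generalizing P Q with
  | nil => simp
  | cons x xs ih =>
    by_cases h : c x = true <;>
      simp [List.foldl_cons, h, ih, List.append_assoc]

-- inserting past a prefix the element does not go before
theorem pv_insertBy_append {α : Type} (before : α → α → Bool) (x : α) (f0 rest : List α)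
    (h : ∀ y ∈ f0, before x y = false) :
    PySem.List.insertBy before x (f0 ++ rest) = f0 ++ PySem.List.insertBy before x rest := by
  induction f0 with
  | nil => simp
  | cons y ys ih =>
    have hy : before x y = false := h y (by simp)
    simp [PySem.List.insertBy, hy, ih (fun z hz => h z (by simp [hz]))]

-- Stability of insertion sort on a binary 0/1 key: it is exactly the partition.
theorem pv_foldl_insertBy_binary {α : Type} (c : α → Bool) (xs P Q : List α)
    (hP : ∀ y ∈ P, c y = true) (hQ : ∀ y ∈ Q, c y = false) :
    xs.foldl (fun acc x =>
        PySem.List.insertBy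
          (fun a b => decide ((if c a then (0 : Int) else 1) < (if c b then (0 : Int) else 1)))
          x acc) (P ++ Q)
      = (P ++ xs.filter c) ++ (Q ++ xs.filter (fun x => !c x)) := by
  induction xs generalizing P Q with
  | nil => simp
  | cons x xs ih =>
    rw [List.foldl_cons]
    by_cases h : c x = true
    · have hstep : PySem.List.insertBy
          (fun a b => decide ((if c a then (0 : Int) else 1) < (if c b then (0 : Int) else 1)))
          x (P ++ Q) = (P ++ [x]) ++ Q := by
        rw [pv_insertBy_append _ _ _ _ (fun y hy => by simp [h, hP y hy])]
        cases Q with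
        | nil => simp [PySem.List.insertBy]
        | cons q qs =>
          have hq : c q = false := hQ q (by simp)
          simp [PySem.List.insertBy, h, hq]
      have hP' : ∀ y ∈ P ++ [x], c y = true := by
        intro y hy
        rcases List.mem_append.1 hy with hy | hy
        · exact hP y hy
        · simp_all
      rw [hstep, ih (P ++ [x]) Q hP' hQ]
      simp [h, List.append_assoc]
    · have hstep : PySem.List.insertBy
          (fun a b => decide ((if c a then (0 : Int) else 1) < (if c b then (0 : Int) else 1)))
          x (P ++ Q) = P ++ (Q ++ [x]) := by
        rw [PySem.List.insertBy_of_forall_not_before _ _ _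
          (fun y hy => by by_cases hc : c y = true <;> simp [h, hc])]
        simp [List.append_assoc]
      have hQ' : ∀ y ∈ Q ++ [x], c y = false := by
        intro y hy
        rcases List.mem_append.1 hy with hy | hy
        · exact hQ y hy
        · simp_all
      rw [hstep, ih P (Q ++ [x]) hP hQ']
      simp [h, List.append_assoc]

-- ===== VERDICT (by name: the statement is the Claim_ definition above) =====
theorem get_priority_objects_spec : Claim_equal_get_priority_objects := by
  intro spatial_info priority_classes _ _
  unfold Spec_get_priority_objects get_priority_objects get_priority_objects_alt
  have h2 := pv_foldl_insertBy_binary (pvIsPriority (priority_classes.getD pvDefaultPriority))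
    spatial_info [] [] (by simp) (by simp)
  simp only [List.nil_append] at h2
  rw [PySem.List.sorted_eq_foldl_insertBy,
    pv_foldl_partition (pvIsPriority (priority_classes.getD pvDefaultPriority)) spatial_info [] [],
    h2]
  simp
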